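-- pv_equiv track=rewrite | github.com/tjburrows/FMRL-PACE-PIV | batch-submit.py | SplitEvenly
-- ===== SOURCE A (Python) =====
-- def SplitEvenly(total, numSplits):
-- 	segments = []
-- 	for i in range(0,numSplits):
-- 		if i < (total % numSplits):
-- 			segLength = total // numSplits + 1
-- 			start = i*segLength
-- 		else:
-- 			segLength = total // numSplits
-- 			start = total - (numSplits - i) * segLength
-- 		segments.append([1 + start, start + segLength])
-- 	return segments
-- ===== SOURCE B (Python) =====
-- def SplitEvenly(total, numSplits):
-- 	segments = []
-- 	start = 0
-- 	for i in range(numSplits):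
-- 		q, r = divmod(total, numSplits)
-- 		segLength = q + 1 if i < r else q
-- 		segments.append([start + 1, start + segLength])
-- 		start += segLength
-- 	return segments
-- ===== Notes on version B (the rewrite author's own statement) =====
-- stated objective: simpler
-- what changed: Replaces the per-index closed-form start computation (two different start formulas for the two branches) with a single maintained running cursor that advances by each segment's length; divmod stays inside the loop so numSplits==0 still yields [].
import Mathlib
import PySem

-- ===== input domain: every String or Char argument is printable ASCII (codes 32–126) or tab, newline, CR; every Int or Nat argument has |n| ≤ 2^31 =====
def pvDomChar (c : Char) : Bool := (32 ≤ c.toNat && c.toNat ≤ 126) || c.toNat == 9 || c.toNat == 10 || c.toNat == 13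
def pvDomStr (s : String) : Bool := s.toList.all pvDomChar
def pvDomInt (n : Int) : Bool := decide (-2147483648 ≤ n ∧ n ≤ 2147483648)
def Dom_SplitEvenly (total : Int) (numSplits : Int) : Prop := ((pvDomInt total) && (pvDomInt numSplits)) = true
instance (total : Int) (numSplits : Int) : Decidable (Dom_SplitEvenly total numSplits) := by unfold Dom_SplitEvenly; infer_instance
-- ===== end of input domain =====

-- B replaces A's two per-index closed-form start formulas with one running cursor; same O(n), simpler.
-- Both programs are total: the division only happens inside the loop, which is empty when numSplits ≤ 0.

-- ===== PORT A =====
def SplitEvenly (total : Int) (numSplits : Int) : List (List Int) :=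
  (PySem.List.pyRange 0 numSplits 1).foldl (fun segments i =>
    if i < PySem.Int.mod total numSplits then
      let segLength := PySem.Int.floordiv total numSplits + 1
      let start := i * segLength
      segments ++ [[1 + start, start + segLength]]
    else
      let segLength := PySem.Int.floordiv total numSplits
      let start := total - (numSplits - i) * segLength
      segments ++ [[1 + start, start + segLength]]) []

-- ===== PORT B =====
-- divmod(total, numSplits) from Source B; the `none` branch (divisor 0) is unreachable, since the
-- loop body only runs when numSplits ≥ 1 — it only makes the Lean function total.
def SplitEvenly_alt (total : Int) (numSplits : Int) : List (List Int) :=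
  ((PySem.List.pyRange 0 numSplits 1).foldl (fun (st : List (List Int) × Int) i =>
    match PySem.Int.divmod? total numSplits with
    | some (q, r) =>
      let segLength := if i < r then q + 1 else q
      (st.1 ++ [[st.2 + 1, st.2 + segLength]], st.2 + segLength)
    | none => st) ([], 0)).1

-- ===== PRECONDITION & SPEC =====
def Spec_SplitEvenly (total : Int) (numSplits : Int) (out : List (List Int)) : Prop := out = SplitEvenly_alt total numSplits
instance (total : Int) (numSplits : Int) (out : List (List Int)) : Decidable (Spec_SplitEvenly total numSplits out) := by unfold Spec_SplitEvenly; infer_instance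

-- ===== CLAIM (what is proved, stated in full; the proofs are below) =====
def Claim_equal_SplitEvenly : Prop := ∀ (total : Int) (numSplits : Int), Dom_SplitEvenly total numSplits → Spec_SplitEvenly total numSplits (SplitEvenly total numSplits)

-- ===== LEMMAS AND PROOFS =====

-- the running cursor's value after processing indices 0 .. m-1 (for 1 ≤ numSplits, 0 ≤ m ≤ numSplits)
def pvCursor (total numSplits m : Int) : Int :=
  m * PySem.Int.floordiv total numSplits + min m (PySem.Int.mod total numSplits)

-- the cursor equals A's per-index closed-form start value
lemma pvCursor_eq_start (total numSplits m : Int) (_h : 1 ≤ numSplits) (_hm : 0 ≤ m) :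
    pvCursor total numSplits m =
      (if m < PySem.Int.mod total numSplits then m * (PySem.Int.floordiv total numSplits + 1)
       else total - (numSplits - m) * PySem.Int.floordiv total numSplits) := by
  have heq := PySem.Int.floordiv_mul_add_mod total numSplits
  unfold pvCursor
  split_ifs with hc
  · have : min m (PySem.Int.mod total numSplits) = m := by omega
    rw [this]; ring
  · have : min m (PySem.Int.mod total numSplits) = PySem.Int.mod total numSplits := by omega
    rw [this]; linear_combination heq

-- one loop step advances the cursor by the segment length
lemma pvCursor_step (total numSplits m : Int) (_h : 1 ≤ numSplits) (_hm : 0 ≤ m) :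
    pvCursor total numSplits (m + 1) =
      pvCursor total numSplits m +
        (if m < PySem.Int.mod total numSplits then PySem.Int.floordiv total numSplits + 1
         else PySem.Int.floordiv total numSplits) := by
  unfold pvCursor
  split_ifs with hc <;> ring_nf <;> omega

lemma pv_divmod_eq (total numSplits : Int) (h : numSplits ≠ 0) :
    PySem.Int.divmod? total numSplits =
      some (PySem.Int.floordiv total numSplits, PySem.Int.mod total numSplits) := by
  simp [PySem.Int.divmod?, PySem.Int.floordiv, PySem.Int.mod, h]

-- loop invariant: B's fold state over the first m indices is A's fold result paired with the cursor
lemma pv_foldl_invariant (total numSplits : Int) (h : 1 ≤ numSplits) (m : Int)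
    (hm0 : 0 ≤ m) (hm : m ≤ numSplits) :
    ((PySem.List.pyRange 0 m 1).foldl (fun (st : List (List Int) × Int) i =>
        match PySem.Int.divmod? total numSplits with
        | some (q, r) =>
          let segLength := if i < r then q + 1 else q
          (st.1 ++ [[st.2 + 1, st.2 + segLength]], st.2 + segLength)
        | none => st) ([], 0)) =
      ((PySem.List.pyRange 0 m 1).foldl (fun segments i =>
        if i < PySem.Int.mod total numSplits then
          let segLength := PySem.Int.floordiv total numSplits + 1
          let start := i * segLength
          segments ++ [[1 + start, start + segLength]]
        else
          let segLength := PySem.Int.floordiv total numSplits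
          let start := total - (numSplits - i) * segLength
          segments ++ [[1 + start, start + segLength]]) [],
       pvCursor total numSplits m) := by
  revert hm
  induction m, hm0 using Int.le_induction with
  | base =>
      intro _
      have hr : 0 ≤ PySem.Int.mod total numSplits := PySem.Int.mod_nonneg total (by omega)
      simp [pvCursor]
      omega
  | succ m hm0' ih =>
      intro hm
      rw [PySem.List.pyRange_one_succ_right (by omega)]
      simp only [List.foldl_append, List.foldl_cons, List.foldl_nil, ih (by omega)]
      rw [pv_divmod_eq total numSplits (by omega)]
      rw [pvCursor_step total numSplits m h hm0', pvCursor_eq_start total numSplits m h hm0']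
      by_cases hc : m < PySem.Int.mod total numSplits
      · simp only [if_pos hc]
        refine Prod.ext ?_ rfl
        show _ ++ _ = _ ++ _
        ring_nf
      · simp only [if_neg hc]
        refine Prod.ext ?_ rfl
        show _ ++ _ = _ ++ _
        ring_nf

-- ===== VERDICT (by name: the statement is the Claim_ definition above) =====
theorem SplitEvenly_spec : Claim_equal_SplitEvenly := by
  intro total numSplits _
  show SplitEvenly total numSplits = SplitEvenly_alt total numSplits
  by_cases h : 1 ≤ numSplits
  · unfold SplitEvenly SplitEvenly_alt
    rw [pv_foldl_invariant total numSplits h numSplits (by omega) le_rfl]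
  · unfold SplitEvenly SplitEvenly_alt
    rw [PySem.List.pyRange_one_eq_nil (by omega)]
    rfl
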